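-- pv_equiv track=rewrite | github.com/serhii-soboliev/crackinginterview | crackinginterview-source/algo/codeforces/cr/n598/с_platform_jump.py | trivial_platform
-- ===== SOURCE A (Python) =====
-- def trivial_platform(n, m, c):
--     res = [0] * n
--     cur_pos = 0
--     for i in range(m):
--         for j in range(cur_pos, cur_pos + c[i]):
--             res[i] = j+1
--             cur_pos += 1
--     return True, res
-- ===== SOURCE B (Python) =====
-- def trivial_platform(n, m, c):
--     # staged: 1) prefix sums of positive parts of c[:m], 2) build res by comprehension
--     pref = []
--     run = 0
--     for x in c[:m]:
--         run += x if x > 0 else 0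
--         pref.append(run)
--     res = [pref[i] if i < m and c[i] > 0 else 0 for i in range(n)]
--     return True, res
-- ===== Notes on version B (the rewrite author's own statement) =====
-- stated objective: faster
-- what changed: Replaced A's nested loops writing res[i] once per unit of c[i] (O(sum c)) by two staged passes: a prefix-sum list of the positive parts of c[:m], then a comprehension reading pref[i] for each index (O(n+m)).
import Mathlib
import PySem

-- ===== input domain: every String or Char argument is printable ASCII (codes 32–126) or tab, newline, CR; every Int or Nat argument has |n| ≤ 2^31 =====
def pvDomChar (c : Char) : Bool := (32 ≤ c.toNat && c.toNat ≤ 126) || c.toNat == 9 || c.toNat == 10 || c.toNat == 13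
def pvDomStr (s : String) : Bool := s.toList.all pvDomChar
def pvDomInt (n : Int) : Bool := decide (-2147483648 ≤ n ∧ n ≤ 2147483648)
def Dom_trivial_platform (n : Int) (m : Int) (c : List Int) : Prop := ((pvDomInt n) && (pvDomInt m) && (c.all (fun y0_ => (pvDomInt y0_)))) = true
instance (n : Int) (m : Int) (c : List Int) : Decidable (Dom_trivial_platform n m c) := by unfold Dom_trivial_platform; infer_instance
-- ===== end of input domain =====

-- B replaces A's per-unit nested loops by two staged passes: a prefix-sum list, then a comprehension.

-- ===== PORT A =====
-- one iteration of A's outer loop: the inner 'for j in range(cur_pos, cur_pos + c[i])'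
def pvStepA (c : List Int) (st : List Int × Int) (i : Int) : List Int × Int :=
  let ci := PySem.List.pyGetD c i 0
  (PySem.List.pyRange st.2 (st.2 + ci) 1).foldl
    (fun st2 j => (st2.1.set i.toNat (j + 1), st2.2 + 1)) st

def trivial_platform (n : Int) (m : Int) (c : List Int) : Bool × List Int :=
  (true, ((PySem.List.pyRange 0 m 1).foldl (pvStepA c) (List.replicate n.toNat 0, 0)).1)

-- ===== PORT B =====
-- pass 1 of B: 'for x in c[:m]: run += x if x > 0 else 0; pref.append(run)'
def pvPref (run : Int) : List Int → List Int
  | [] => []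
  | x :: xs =>
      let run' := run + (if 0 < x then x else 0)
      run' :: pvPref run' xs

-- pass 2 of B: '[pref[i] if i < m and c[i] > 0 else 0 for i in range(n)]'
def trivial_platform_alt (n : Int) (m : Int) (c : List Int) : Bool × List Int :=
  let pref := pvPref 0 (PySem.List.slice c none (some m))
  (true, (List.range n.toNat).map (fun (i : Nat) =>
    if (i : Int) < m ∧ 0 < PySem.List.pyGetD c (i : Int) 0 then pref.getD i 0 else 0))

-- ===== PRECONDITION & SPEC =====
-- Pre_ excludes exactly the inputs where Python A raises IndexError: m beyond len(c)
-- (c[i] is read for every i < m), or some i < m with c[i] > 0 and i >= n (the write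
-- res[i] is out of range).
def Pre_trivial_platform (n : Int) (m : Int) (c : List Int) : Prop :=
  m ≤ (c.length : Int) ∧ ∀ i ∈ List.range m.toNat, 0 < c.getD i 0 → (i : Int) < n
instance (n : Int) (m : Int) (c : List Int) : Decidable (Pre_trivial_platform n m c) := by
  unfold Pre_trivial_platform; infer_instance

def pvWitness_trivial_platform : Int × Int × List Int := (3, 2, [1, 2])

def Spec_trivial_platform (n : Int) (m : Int) (c : List Int) (out : Bool × List Int) : Prop := out = trivial_platform_alt n m c
instance (n : Int) (m : Int) (c : List Int) (out : Bool × List Int) : Decidable (Spec_trivial_platform n m c out) := by unfold Spec_trivial_platform; infer_instance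

-- ===== CLAIM (what is proved, stated in full; the proofs are below) =====
def Claim_equal_trivial_platform : Prop := ∀ (n : Int) (m : Int) (c : List Int), Dom_trivial_platform n m c → Pre_trivial_platform n m c → Spec_trivial_platform n m c (trivial_platform n m c)

-- ===== LEMMAS AND PROOFS =====

-- running sum of positive parts of the first M entries of c
def pvS (c : List Int) (M : Nat) : Int :=
  ((c.take M).map (fun x => if 0 < x then x else 0)).sum

-- the state of one outer iteration of A, written as a single conditional write
def pvStepW (c : List Int) (st : List Int × Int) (i : Int) : List Int × Int :=
  let ci := PySem.List.pyGetD c i 0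
  if 0 < ci then (st.1.set i.toNat (st.2 + ci), st.2 + ci) else st

-- A's inner loop over range(cur, cur+k) ends with res[i] = cur+k (if it ran) and cur_pos = cur+k.
lemma pv_inner (i : Nat) (res : List Int) (cur : Int) (k : Nat) :
    (PySem.List.pyRange cur (cur + k) 1).foldl
      (fun st2 j => (st2.1.set i (j + 1), st2.2 + 1)) (res, cur)
    = (if 0 < k then res.set i (cur + k) else res, cur + k) := by
  induction k generalizing res cur with
  | zero => rw [PySem.List.pyRange_one_eq_nil (by simp : cur + ((0:Nat):Int) ≤ cur)]; simp
  | succ k ih =>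
    rw [PySem.List.pyRange_one_cons (by push_cast; omega : cur < cur + ((k+1 : Nat) : Int))]
    have h : cur + ((k+1 : Nat) : Int) = (cur + 1) + (k : Int) := by push_cast; omega
    rw [List.foldl_cons, h]
    rw [ih (res.set i (cur + 1)) (cur + 1)]
    by_cases hk : 0 < k
    · simp [hk, List.set_set]
    · have : k = 0 := by omega
      simp [this]

lemma pv_step_eq (c : List Int) : pvStepA c = pvStepW c := by
  funext st i
  unfold pvStepA pvStepW
  set ci := PySem.List.pyGetD c i 0 with hci
  by_cases h : 0 < ci
  · have hk : ci = (ci.toNat : Int) := by omega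
    have hpos : 0 < ci.toNat := by omega
    rw [hk, pv_inner i.toNat st.1 st.2 ci.toNat, if_pos hpos,
        if_pos (by exact_mod_cast hpos : (0:Int) < (ci.toNat : Int))]
  · have : st.2 + ci ≤ st.2 := by omega
    simp [PySem.List.pyRange_one_eq_nil this, h]

lemma pvS_succ (c : List Int) (M : Nat) (h : M < c.length) :
    pvS c (M + 1) = pvS c M + (if 0 < c.getD M 0 then c.getD M 0 else 0) := by
  have h1 : c.take (M + 1) = c.take M ++ [c.getD M 0] := by
    rw [List.take_add_one, List.getElem?_eq_getElem h]
    simp [List.getD_eq_getElem?_getD, List.getElem?_eq_getElem h]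
  unfold pvS
  rw [h1]
  simp

-- invariant for A's outer loop folded over [0, …, M-1]
lemma pv_fold (c : List Int) (n : Int) (M : Nat)
    (hlen : M ≤ c.length)
    (hwr : ∀ i : Nat, i < M → 0 < c.getD i 0 → (i : Int) < n) :
    ((List.range M).map (fun (k : Nat) => (k : Int))).foldl (pvStepW c) (List.replicate n.toNat 0, 0)
    = ((List.range n.toNat).map (fun i => if i < M ∧ 0 < c.getD i 0 then pvS c (i+1) else 0),
       pvS c M) := by
  induction M with
  | zero =>
    simp only [List.range_zero, List.map_nil, List.foldl_nil]
    rw [show pvS c 0 = 0 from by simp [pvS]]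
    congr 1
    apply List.ext_getElem <;> simp
  | succ M ih =>
    have hlen' : M ≤ c.length := by omega
    have hM : M < c.length := by omega
    rw [List.range_succ, List.map_append, List.foldl_append,
        ih hlen' (fun i hi => hwr i (by omega))]
    simp only [List.map_cons, List.map_nil, List.foldl_cons, List.foldl_nil]
    unfold pvStepW
    have hget : PySem.List.pyGetD c ((M : Nat) : Int) 0 = c.getD M 0 :=
      PySem.List.pyGetD_natCast c M 0
    by_cases hp : 0 < c.getD M 0
    · rw [hget]
      simp only [hp, if_pos]
      have hMn : M < n.toNat := by
        have := hwr M (by omega) hp; omega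
      simp only [Prod.mk.injEq]
      constructor
      · apply List.ext_getElem
        · simp
        · intro i h1 h2
          simp only [List.length_set, List.length_map, List.length_range] at h1 h2
          rw [List.getElem_set]
          simp only [List.getElem_map, List.getElem_range]
          have hcast : ((M : Nat) : Int).toNat = M := by simp
          rw [hcast]
          by_cases hiM : M = i
          · subst hiM
            rw [if_pos rfl, if_pos ⟨by omega, hp⟩, pvS_succ c M hM, if_pos hp]
          · rw [if_neg hiM]
            by_cases hi : i < M ∧ 0 < c.getD i 0
            · rw [if_pos hi, if_pos ⟨by omega, hi.2⟩]
            · rw [if_neg hi, if_neg (by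
                intro ⟨h1', h2'⟩
                exact hi ⟨by omega, h2'⟩)]
      · rw [pvS_succ c M hM, if_pos hp]
    · rw [hget]
      simp only [hp, if_false]
      simp only [Prod.mk.injEq]
      constructor
      · apply List.map_congr_left
        intro i _
        by_cases hi : i < M ∧ 0 < c.getD i 0
        · rw [if_pos hi, if_pos ⟨by omega, hi.2⟩]
        · rw [if_neg hi, if_neg (by
            intro ⟨h1', h2'⟩
            rcases Nat.lt_succ_iff_lt_or_eq.mp h1' with h | h
            · exact hi ⟨h, h2'⟩
            · subst h; exact hp h2')]
      · rw [pvS_succ c M hM, if_neg hp, add_zero]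

-- B's prefix list: entry i is run + (positive-part sum of the first i+1 entries)
lemma pvPref_getD (xs : List Int) (run : Int) (i : Nat) (h : i < xs.length) :
    (pvPref run xs).getD i 0 = run + pvS xs (i + 1) := by
  induction xs generalizing run i with
  | nil => simp at h
  | cons x t ih =>
    cases i with
    | zero => simp [pvPref, pvS]
    | succ i =>
      simp only [pvPref, List.getD_cons_succ]
      rw [ih (run + (if 0 < x then x else 0)) i (by simpa using h)]
      simp [pvS, List.take_succ_cons]
      ring

-- ===== VERDICT (by name: the statement is the Claim_ definition above) =====
theorem trivial_platform_spec : Claim_equal_trivial_platform := by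
  intro n m c _ hpre
  obtain ⟨hlen, hwr⟩ := hpre
  unfold Spec_trivial_platform trivial_platform trivial_platform_alt
  rw [pv_step_eq]
  have hrange : PySem.List.pyRange 0 m 1 = (List.range m.toNat).map (fun (k : Nat) => (k : Int)) := by
    rw [PySem.List.pyRange_one 0 m]
    simp only [Int.sub_zero, zero_add]
  rw [hrange, pv_fold c n m.toNat (by omega)
        (fun i hi hp => hwr i (List.mem_range.mpr hi) hp)]
  simp only [Prod.mk.injEq, true_and]
  apply List.map_congr_left
  intro i _
  by_cases hc : i < m.toNat ∧ 0 < c.getD i 0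
  · have him : (i : Int) < m := by omega
    have hic : i < c.length := by omega
    rw [if_pos hc, if_pos ⟨him, by rw [PySem.List.pyGetD_natCast]; exact hc.2⟩]
    have hm : m = ((m.toNat : Nat) : Int) := by omega
    rw [hm, PySem.List.slice_to_natCast]
    rw [pvPref_getD (c.take m.toNat) 0 i (by simp; omega)]
    unfold pvS
    rw [List.take_take, Nat.min_eq_left (by omega), zero_add]
  · rw [if_neg hc, if_neg (by
      intro ⟨h1', h2'⟩
      rw [PySem.List.pyGetD_natCast] at h2'
      exact hc ⟨by omega, h2'⟩)]
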